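-- pv_equiv track=rewrite | github.com/jaredap1995/LeetCode | Python/Medium/graphs/checkIfPreReq.py | correctSolution
-- ===== SOURCE A (Python) =====
-- import collections
--
-- def correctSolution(n,numCourses,prerequisites,queries):
--     graph = collections.defaultdict(list)
--     isReachable = collections.defaultdict(set)
--
--     for prereq, course in prerequisites:
--         graph[prereq].append(course)
--
--     def DFS(node):
--         if node in isReachable:
--             return isReachable[node]
--
--         for neighbor in graph[node]:
--             isReachable[node].add(neighbor)
--             isReachable[node].update(DFS(neighbor))
--
--         return isReachable[node]
--
--     for i in range(numCourses):
--         DFS(i)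
--
--     return [course in isReachable[prereq] for prereq, course in queries]
-- ===== SOURCE B (Python) =====
-- def correctSolution(n, numCourses, prerequisites, queries):
--     # Iterative DFS with an explicit frame stack instead of recursion,
--     # reproducing the same memoisation order as the recursive original.
--     graph = {}
--     for prereq, course in prerequisites:
--         graph.setdefault(prereq, []).append(course)
--     R = {}
--     for i in range(numCourses):
--         if i in R:
--             continue
--         R[i] = set()
--         stack = [(i, graph.get(i, []))]
--         while stack:
--             node, nbrs = stack[-1]
--             if nbrs:
--                 v = nbrs[0]
--                 stack[-1] = (node, nbrs[1:])
--                 R[node].add(v)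
--                 if v in R:
--                     R[node] |= R[v]
--                 else:
--                     R[v] = set()
--                     stack.append((v, graph.get(v, [])))
--             else:
--                 stack.pop()
--                 if stack:
--                     R[stack[-1][0]] |= R[node]
--     return [course in R.get(prereq, set()) for prereq, course in queries]
-- ===== Notes on version B (the rewrite author's own statement) =====
-- stated objective: alternative
-- what changed: The recursive memoised DFS (nested function with Python-recursion and implicit call stack) is replaced by an iterative DFS driven by an explicit stack of (node, remaining-neighbours) frames that maintains the same memo dictionary in the same order, so results agree exactly, including on cyclic graphs where the memo is filled with partially-computed sets.
import Mathlib
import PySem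

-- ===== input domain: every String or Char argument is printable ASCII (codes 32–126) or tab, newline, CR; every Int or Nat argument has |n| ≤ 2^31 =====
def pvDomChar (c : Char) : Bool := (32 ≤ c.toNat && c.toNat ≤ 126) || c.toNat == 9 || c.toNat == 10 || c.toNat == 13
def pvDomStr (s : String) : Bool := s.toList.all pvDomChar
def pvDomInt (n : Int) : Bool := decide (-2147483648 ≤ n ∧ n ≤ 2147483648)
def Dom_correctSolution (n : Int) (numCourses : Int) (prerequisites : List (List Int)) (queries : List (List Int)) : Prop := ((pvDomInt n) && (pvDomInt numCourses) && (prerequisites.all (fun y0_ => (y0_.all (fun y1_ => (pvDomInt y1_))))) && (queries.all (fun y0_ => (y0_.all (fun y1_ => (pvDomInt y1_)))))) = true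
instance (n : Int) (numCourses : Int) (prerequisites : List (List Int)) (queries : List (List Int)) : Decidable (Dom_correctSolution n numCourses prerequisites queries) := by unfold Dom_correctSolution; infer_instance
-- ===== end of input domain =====

-- B replaces A's recursive memoised DFS (global recursion + per-node memo sets) by an iterative
-- explicit-frame-stack DFS maintaining the same memo; objective: alternative (no speed claim).
-- A's port uses a fuel parameter only as a totality guard; the fuel is proved sufficient below.

-- ===== PORT A =====
def pvPairFst (row : List Int) : Int := row.getD 0 0
def pvPairSnd (row : List Int) : Int := row.getD 1 0

def pvGraph (prerequisites : List (List Int)) : PySem.Dict Int (List Int) :=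
  prerequisites.foldl (fun g row => g.modify (pvPairFst row) [] (· ++ [pvPairSnd row])) PySem.Dict.empty

mutual
def dfsA (g : PySem.Dict Int (List Int)) (f : Nat) (node : Int)
    (R : PySem.Dict Int (PySem.Set Int)) :
    PySem.Set Int × PySem.Dict Int (PySem.Set Int) × Nat :=
  match f with
  | 0 => (PySem.Set.empty, R, 0)
  | f' + 1 =>
    match R.get? node with
    | some s => (s, R, f')
    | none =>
      let q := dfsALoop g f' node (g.getD node []) R
      (q.1.getD node PySem.Set.empty, q.1.insert node (q.1.getD node PySem.Set.empty), q.2)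
termination_by (f, 0)

def dfsALoop (g : PySem.Dict Int (List Int)) (f : Nat) (node : Int) (vs : List Int)
    (R : PySem.Dict Int (PySem.Set Int)) :
    PySem.Dict Int (PySem.Set Int) × Nat :=
  match vs with
  | [] => (R, f)
  | v :: vs' =>
    match f with
    | 0 => (R, 0)
    | f' + 1 =>
      let R1 := R.insert node ((R.getD node PySem.Set.empty).add v)
      let t := dfsA g (f' + 1) v R1
      let R3 := t.2.1.insert node (PySem.Set.union (t.2.1.getD node PySem.Set.empty) t.1)
      dfsALoop g (min t.2.2 f') node vs' R3
termination_by (f, vs.length + 1)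
decreasing_by
  all_goals first
    | exact Prod.Lex.right _ (Nat.zero_lt_succ _)
    | exact Prod.Lex.left _ _ (Nat.lt_succ_self _)
    | exact Prod.Lex.left _ _ (Nat.lt_succ_of_le (Nat.min_le_right _ _))
end

def correctSolution (n : Int) (numCourses : Int) (prerequisites : List (List Int)) (queries : List (List Int)) : List Bool :=
  let g := pvGraph prerequisites
  let fuel := numCourses.toNat + ((g.keys.map (fun k => (g.getD k []).length)).sum) + 1
  let st := (PySem.List.pyRange 0 numCourses 1).foldl
      (fun (st : PySem.Dict Int (PySem.Set Int) × Nat) i =>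
        let t := dfsA g st.2 i st.1
        (t.2.1, t.2.2)) (PySem.Dict.empty, fuel)
  queries.map (fun q => PySem.Set.contains (st.1.getD (pvPairFst q) PySem.Set.empty) (pvPairSnd q))



-- ===== PORT B =====
def pvNodes (g : PySem.Dict Int (List Int)) (stack : List (Int × List Int)) : Finset Int :=
  (((g.keys ++ g.values.flatten) ++ stack.map Prod.fst) ++ stack.flatMap Prod.snd).toFinset

def pvMu1 (g : PySem.Dict Int (List Int)) (stack : List (Int × List Int))
    (R : PySem.Dict Int (PySem.Set Int)) : Nat :=
  (pvNodes g stack \ R.keys.toFinset).card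

def pvMu2 (stack : List (Int × List Int)) : Nat :=
  (stack.map (fun p => p.2.length)).sum + stack.length

lemma pv_mem_pvNodes (g : PySem.Dict Int (List Int)) (stack : List (Int × List Int)) (x : Int) :
    x ∈ pvNodes g stack ↔
      (x ∈ g.keys ∨ x ∈ g.values.flatten ∨ ∃ q ∈ stack, q.1 = x ∨ x ∈ q.2) := by
  simp only [pvNodes, List.mem_toFinset, List.mem_append, List.mem_map, List.mem_flatMap]
  constructor
  · rintro (((h | h) | ⟨q, hq, rfl⟩) | ⟨q, hq, hx⟩)
    · exact Or.inl h
    · exact Or.inr (Or.inl h)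
    · exact Or.inr (Or.inr ⟨q, hq, Or.inl rfl⟩)
    · exact Or.inr (Or.inr ⟨q, hq, Or.inr hx⟩)
  · rintro (h | h | ⟨q, hq, rfl | hx⟩)
    · exact Or.inl (Or.inl (Or.inl h))
    · exact Or.inl (Or.inl (Or.inr h))
    · exact Or.inl (Or.inr ⟨q, hq, rfl⟩)
    · exact Or.inr ⟨q, hq, hx⟩

lemma pv_getD_sub (g : PySem.Dict Int (List Int)) (k : Int) {x : Int}
    (hx : x ∈ g.getD k []) : x ∈ g.values.flatten := by
  rw [PySem.Dict.getD_eq_get?_getD] at hx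
  cases h : g.get? k with
  | none => rw [h] at hx; simp at hx
  | some l =>
    rw [h] at hx
    have hm : (k, l) ∈ g.items := PySem.Dict.mem_items_of_get?_eq_some g h
    simp only [List.mem_flatten]
    refine ⟨l, ?_, hx⟩
    have : l ∈ g.items.map Prod.snd := List.mem_map.mpr ⟨(k,l), hm, rfl⟩
    simpa [PySem.Dict.values] using this

lemma pv_keys_insert_sub (d : PySem.Dict Int (PySem.Set Int)) (k : Int) (v : PySem.Set Int) :
    d.keys.toFinset ⊆ (d.insert k v).keys.toFinset := by
  intro x hx
  simp only [List.mem_toFinset] at *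
  exact (PySem.Dict.mem_keys_insert _ _ _ _).mpr (Or.inr hx)

lemma pv_mu1_pop (g : PySem.Dict Int (List Int)) (node p : Int) (ps : List Int)
    (rest : List (Int × List Int)) (R : PySem.Dict Int (PySem.Set Int)) (v : PySem.Set Int) :
    pvMu1 g ((p, ps) :: rest) (R.insert p v) ≤ pvMu1 g ((node, []) :: (p, ps) :: rest) R := by
  apply Finset.card_le_card
  apply Finset.sdiff_subset_sdiff
  · intro x hx
    rw [pv_mem_pvNodes] at *
    rcases hx with h | h | ⟨q, hq, hx⟩
    · exact Or.inl h
    · exact Or.inr (Or.inl h)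
    · exact Or.inr (Or.inr ⟨q, List.mem_cons_of_mem _ hq, hx⟩)
  · exact pv_keys_insert_sub R p v

lemma pv_mu1_hit (g : PySem.Dict Int (List Int)) (node v : Int) (vs : List Int)
    (rest : List (Int × List Int)) (R : PySem.Dict Int (PySem.Set Int)) (a b : PySem.Set Int) :
    pvMu1 g ((node, vs) :: rest) ((R.insert node a).insert node b)
      ≤ pvMu1 g ((node, v :: vs) :: rest) R := by
  apply Finset.card_le_card
  apply Finset.sdiff_subset_sdiff
  · intro x hx
    rw [pv_mem_pvNodes] at *
    rcases hx with h | h | ⟨q, hq, hx⟩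
    · exact Or.inl h
    · exact Or.inr (Or.inl h)
    · rw [List.mem_cons] at hq
      rcases hq with rfl | hq
      · rcases hx with rfl | hx
        · exact Or.inr (Or.inr ⟨(node, v :: vs), List.mem_cons_self, Or.inl rfl⟩)
        · exact Or.inr (Or.inr ⟨(node, v :: vs), List.mem_cons_self, Or.inr (List.mem_cons_of_mem _ hx)⟩)
      · exact Or.inr (Or.inr ⟨q, List.mem_cons_of_mem _ hq, hx⟩)
  · exact (pv_keys_insert_sub _ node a).trans (pv_keys_insert_sub _ node b)

lemma pv_mu1_push (g : PySem.Dict Int (List Int)) (node v : Int) (vs : List Int)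
    (rest : List (Int × List Int)) (R : PySem.Dict Int (PySem.Set Int)) (a : PySem.Set Int)
    (hv : (R.insert node a).get? v = none) :
    pvMu1 g ((v, g.getD v []) :: (node, vs) :: rest) ((R.insert node a).insert v PySem.Set.empty)
      < pvMu1 g ((node, v :: vs) :: rest) R := by
  have hvR1 : v ∉ (R.insert node a).keys := by
    rw [PySem.Dict.get?_eq_none_iff_not_mem_keys] at hv
    exact hv
  have hvR : v ∉ R.keys := fun h => hvR1 ((PySem.Dict.mem_keys_insert _ _ _ _).mpr (Or.inr h))
  apply Finset.card_lt_card
  constructor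
  · apply Finset.sdiff_subset_sdiff
    · intro x hx
      rw [pv_mem_pvNodes] at *
      rcases hx with h | h | ⟨q, hq, hx⟩
      · exact Or.inl h
      · exact Or.inr (Or.inl h)
      · rw [List.mem_cons, List.mem_cons] at hq
        rcases hq with rfl | rfl | hq
        · rcases hx with rfl | hx
          · exact Or.inr (Or.inr ⟨(node, v :: vs), List.mem_cons_self, Or.inr List.mem_cons_self⟩)
          · exact Or.inr (Or.inl (pv_getD_sub g v hx))
        · rcases hx with rfl | hx
          · exact Or.inr (Or.inr ⟨(node, v :: vs), List.mem_cons_self, Or.inl rfl⟩)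
          · exact Or.inr (Or.inr ⟨(node, v :: vs), List.mem_cons_self, Or.inr (List.mem_cons_of_mem _ hx)⟩)
        · exact Or.inr (Or.inr ⟨q, List.mem_cons_of_mem _ hq, hx⟩)
    · exact (pv_keys_insert_sub _ node a).trans (pv_keys_insert_sub _ v _)
  · intro hsub
    have hvmem : v ∈ pvNodes g ((node, v :: vs) :: rest) \ R.keys.toFinset := by
      rw [Finset.mem_sdiff, pv_mem_pvNodes]
      constructor
      · exact Or.inr (Or.inr ⟨(node, v :: vs), List.mem_cons_self, Or.inr List.mem_cons_self⟩)
      · simpa using hvR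
    have h2 := hsub hvmem
    rw [Finset.mem_sdiff, List.mem_toFinset] at h2
    exact h2.2 ((PySem.Dict.mem_keys_insert _ _ _ _).mpr (Or.inl rfl))

lemma pv_lex_of {a a' b b' : Nat} (h1 : a' ≤ a) (h2 : b' < b) :
    Prod.Lex (fun x y => x < y) (fun x y : Nat => x < y) (a', b') (a, b) := by
  rcases lt_or_eq_of_le h1 with h | h
  · exact Prod.Lex.left _ _ h
  · rw [h]; exact Prod.Lex.right _ h2

def runB (g : PySem.Dict Int (List Int)) (stack : List (Int × List Int))
    (R : PySem.Dict Int (PySem.Set Int)) : PySem.Dict Int (PySem.Set Int) :=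
  match stack with
  | [] => R
  | [(_node, [])] => R
  | (node, []) :: (p, ps) :: rest =>
    runB g ((p, ps) :: rest)
      (R.insert p (PySem.Set.union (R.getD p PySem.Set.empty) (R.getD node PySem.Set.empty)))
  | (node, v :: vs) :: rest =>
    let R1 := R.insert node ((R.getD node PySem.Set.empty).add v)
    match _h : R1.get? v with
    | some sv => runB g ((node, vs) :: rest) (R1.insert node (PySem.Set.union (R1.getD node PySem.Set.empty) sv))
    | none => runB g ((v, g.getD v []) :: (node, vs) :: rest) (R1.insert v PySem.Set.empty)
termination_by (pvMu1 g stack R, pvMu2 stack)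
decreasing_by
  · exact pv_lex_of (pv_mu1_pop g node p ps rest R _) (by simp only [pvMu2, List.map_cons, List.sum_cons, List.length_cons]; omega)
  · exact pv_lex_of (pv_mu1_hit g node v vs rest R _ _) (by simp only [pvMu2, List.map_cons, List.sum_cons, List.length_cons]; omega)
  · exact Prod.Lex.left _ _ (pv_mu1_push g node v vs rest R _ _h)

def correctSolution_alt (n : Int) (numCourses : Int) (prerequisites : List (List Int)) (queries : List (List Int)) : List Bool :=
  let g := pvGraph prerequisites
  let R := (PySem.List.pyRange 0 numCourses 1).foldl
      (fun R i => if R.contains i then R else runB g [(i, g.getD i [])] (R.insert i PySem.Set.empty)) PySem.Dict.empty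
  queries.map (fun q => PySem.Set.contains (R.getD (pvPairFst q) PySem.Set.empty) (pvPairSnd q))

-- ===== PRECONDITION & SPEC =====
-- Pre_ excludes exactly the inputs where Python raises: any row of `prerequisites` or `queries`
-- whose length is not 2 makes the tuple unpacking `for prereq, course in ...` raise ValueError.
def Pre_correctSolution (n : Int) (numCourses : Int) (prerequisites : List (List Int)) (queries : List (List Int)) : Prop :=
  (∀ row ∈ prerequisites, row.length = 2) ∧ (∀ row ∈ queries, row.length = 2)
instance (n : Int) (numCourses : Int) (prerequisites : List (List Int)) (queries : List (List Int)) : Decidable (Pre_correctSolution n numCourses prerequisites queries) := by unfold Pre_correctSolution; infer_instance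

def pvWitness_correctSolution : Int × Int × List (List Int) × List (List Int) :=
  (0, 3, [[0, 1], [1, 2]], [[0, 2], [2, 0]])

def Spec_correctSolution (n : Int) (numCourses : Int) (prerequisites : List (List Int)) (queries : List (List Int)) (out : List Bool) : Prop := out = correctSolution_alt n numCourses prerequisites queries
instance (n : Int) (numCourses : Int) (prerequisites : List (List Int)) (queries : List (List Int)) (out : List Bool) : Decidable (Spec_correctSolution n numCourses prerequisites queries out) := by unfold Spec_correctSolution; infer_instance

-- ===== CLAIM (what is proved, stated in full; the proofs are below) =====
def Claim_equal_correctSolution : Prop := ∀ (n : Int) (numCourses : Int) (prerequisites : List (List Int)) (queries : List (List Int)), Dom_correctSolution n numCourses prerequisites queries → Pre_correctSolution n numCourses prerequisites queries → Spec_correctSolution n numCourses prerequisites queries (correctSolution n numCourses prerequisites queries)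

-- ===== LEMMAS AND PROOFS =====



-- Dict utility lemmas
lemma pv_insert_insert {κ ν : Type} [BEq κ] [LawfulBEq κ] (d : PySem.Dict κ ν) (k : κ) (a b : ν) :
    (d.insert k a).insert k b = d.insert k b := by
  apply PySem.Dict.ext
  by_cases h : d.contains k = true
  · rw [PySem.Dict.items_insert_of_contains _ _ (PySem.Dict.contains_insert_self d k a),
        PySem.Dict.items_insert_of_contains _ _ h,
        PySem.Dict.items_insert_of_contains _ _ h, List.map_map]
    apply List.map_congr_left
    intro p _
    by_cases hp : p.1 == k
    · simp [hp]
    · rw [Bool.not_eq_true] at hp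
      simp [Function.comp, hp]
  · have h2 : ∀ p ∈ d.items, (p.1 == k) = false := by
      intro p hp
      by_contra hc
      have : p.1 = k := by simpa using hc
      exact h (by
        rw [PySem.Dict.contains_iff_mem_keys]
        subst this
        exact PySem.Dict.mem_keys_of_mem_items d hp)
    rw [PySem.Dict.items_insert_of_contains _ _ (PySem.Dict.contains_insert_self d k a),
        PySem.Dict.items_insert_of_not_contains _ _ (by simpa using h),
        PySem.Dict.items_insert_of_not_contains _ _ (by simpa using h),
        List.map_append]
    congr 1
    · have h3 : ∀ p ∈ d.items, (fun p : κ × ν => if (p.1 == k) = true then (k, b) else p) p = id p := by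
        intro p hp
        simp [h2 p hp]
      rw [List.map_congr_left h3, List.map_id]
    · simp

lemma pv_insert_getD_self {κ ν : Type} [BEq κ] [LawfulBEq κ] (d : PySem.Dict κ ν) (k : κ) (d0 : ν)
    (h : d.contains k = true) (hnd : d.keys.Nodup) :
    d.insert k (d.getD k d0) = d := by
  apply PySem.Dict.ext
  rw [PySem.Dict.items_insert_of_contains _ _ h]
  have : ∀ p ∈ d.items, (if p.1 == k then (k, d.getD k d0) else p) = p := by
    intro p hp
    by_cases hpk : p.1 == k
    · have hk : p.1 = k := by simpa using hpk
      have hmem : (k, p.2) ∈ d.items := by rw [← hk]; exact hp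
      have : d.getD k d0 = p.2 := PySem.Dict.getD_of_mem_items d hmem hnd d0
      rw [if_pos hpk, this, ← hk]
    · rw [if_neg hpk]
  simpa using List.map_congr_left this

-- leftover fuel bounds
lemma pv_fuel : ∀ f : Nat,
    (∀ (g : PySem.Dict Int (List Int)) node R, (dfsA g f node R).2.2 + 1 ≤ f ∨ f = 0) ∧
    (∀ (g : PySem.Dict Int (List Int)) node vs R, (dfsALoop g f node vs R).2 ≤ f) := by
  intro f
  induction f using Nat.strong_induction_on with
  | _ f IH =>
    have hA : ∀ (g : PySem.Dict Int (List Int)) node R, (dfsA g f node R).2.2 + 1 ≤ f ∨ f = 0 := by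
      intro g node R
      match f with
      | 0 => exact Or.inr rfl
      | f' + 1 =>
        rw [dfsA]
        cases hg : R.get? node with
        | some s => exact Or.inl (Nat.le_refl _)
        | none =>
          left
          show (dfsALoop g f' node (g.getD node []) R).2 + 1 ≤ f' + 1
          have := (IH f' (by omega)).2 g node (g.getD node []) R
          omega
    refine ⟨hA, ?_⟩
    intro g node vs R
    match vs with
    | [] => rw [dfsALoop]
    | v :: vs' =>
      match f with
      | 0 => rw [dfsALoop]
      | f' + 1 =>
        show (dfsALoop g (f' + 1) node (v :: vs') R).2 ≤ f' + 1
        rw [dfsALoop]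
        have h1 := (IH (min (dfsA g (f' + 1) v
          (R.insert node ((R.getD node PySem.Set.empty).add v))).2.2 f') (by omega)).2
        refine le_trans (h1 g node vs' _) (by omega)

-- clean unfolding equations
lemma pv_eqA0 (g : PySem.Dict Int (List Int)) (node : Int) (R : PySem.Dict Int (PySem.Set Int)) :
    dfsA g 0 node R = (PySem.Set.empty, R, 0) := by rw [dfsA]

lemma pv_eqAhit (g : PySem.Dict Int (List Int)) (f' : Nat) (node : Int)
    (R : PySem.Dict Int (PySem.Set Int)) (s : PySem.Set Int) (h : R.get? node = some s) :
    dfsA g (f' + 1) node R = (s, R, f') := by rw [dfsA, h]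

lemma pv_eqAmiss (g : PySem.Dict Int (List Int)) (f' : Nat) (node : Int)
    (R : PySem.Dict Int (PySem.Set Int)) (h : R.get? node = none) :
    dfsA g (f' + 1) node R =
      ((dfsALoop g f' node (g.getD node []) R).1.getD node PySem.Set.empty,
       (dfsALoop g f' node (g.getD node []) R).1.insert node
         ((dfsALoop g f' node (g.getD node []) R).1.getD node PySem.Set.empty),
       (dfsALoop g f' node (g.getD node []) R).2) := by rw [dfsA, h]

lemma pv_eqL0 (g : PySem.Dict Int (List Int)) (f : Nat) (node : Int)
    (R : PySem.Dict Int (PySem.Set Int)) :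
    dfsALoop g f node [] R = (R, f) := by rw [dfsALoop]

lemma pv_eqLz (g : PySem.Dict Int (List Int)) (node v : Int) (vs' : List Int)
    (R : PySem.Dict Int (PySem.Set Int)) :
    dfsALoop g 0 node (v :: vs') R = (R, 0) := by rw [dfsALoop]

lemma pv_loop_le (g : PySem.Dict Int (List Int)) (f : Nat) (node : Int) (vs : List Int)
    (R : PySem.Dict Int (PySem.Set Int)) : (dfsALoop g f node vs R).2 ≤ f :=
  (pv_fuel f).2 g node vs R

lemma pv_eqLcons (g : PySem.Dict Int (List Int)) (f' : Nat) (node v : Int) (vs' : List Int)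
    (R : PySem.Dict Int (PySem.Set Int)) :
    dfsALoop g (f' + 1) node (v :: vs') R =
      (let R1 := R.insert node ((R.getD node PySem.Set.empty).add v)
       let t := dfsA g (f' + 1) v R1
       let R3 := t.2.1.insert node (PySem.Set.union (t.2.1.getD node PySem.Set.empty) t.1)
       dfsALoop g t.2.2 node vs' R3) := by
  rw [dfsALoop]
  have hle : (dfsA g (f' + 1) v (R.insert node ((R.getD node PySem.Set.empty).add v))).2.2 ≤ f' := by
    rcases (pv_fuel (f' + 1)).1 g v (R.insert node ((R.getD node PySem.Set.empty).add v)) with h | h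
    · omega
    · omega
  simp only [Nat.min_eq_left hle]

-- invariants: key membership is preserved and keys stay Nodup
lemma pv_inv : ∀ f : Nat,
    (∀ (g : PySem.Dict Int (List Int)) node R,
      (∀ k, R.contains k = true → (dfsA g f node R).2.1.contains k = true) ∧
      (R.keys.Nodup → (dfsA g f node R).2.1.keys.Nodup)) ∧
    (∀ (g : PySem.Dict Int (List Int)) node vs R,
      (∀ k, R.contains k = true → (dfsALoop g f node vs R).1.contains k = true) ∧
      (R.keys.Nodup → (dfsALoop g f node vs R).1.keys.Nodup)) := by
  intro f
  induction f using Nat.strong_induction_on with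
  | _ f IH =>
    have hA : ∀ (g : PySem.Dict Int (List Int)) node R,
        (∀ k, R.contains k = true → (dfsA g f node R).2.1.contains k = true) ∧
        (R.keys.Nodup → (dfsA g f node R).2.1.keys.Nodup) := by
      intro g node R
      cases f with
      | zero => rw [pv_eqA0]; exact ⟨fun k hk => hk, fun h => h⟩
      | succ f' =>
        cases hg : R.get? node with
        | some s => rw [pv_eqAhit g f' node R s hg]; exact ⟨fun k hk => hk, fun h => h⟩
        | none =>
          rw [pv_eqAmiss g f' node R hg]
          have hq := (IH f' (by omega)).2 g node (g.getD node []) R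
          constructor
          · intro k hk
            simp only [PySem.Dict.contains_insert]
            rw [hq.1 k hk]
            simp
          · intro h
            exact PySem.Dict.nodup_keys_insert _ _ _ (hq.2 h)
    refine ⟨hA, ?_⟩
    intro g node vs R
    cases vs with
    | nil => rw [pv_eqL0]; exact ⟨fun k hk => hk, fun h => h⟩
    | cons v vs' =>
      cases f with
      | zero => rw [pv_eqLz]; exact ⟨fun k hk => hk, fun h => h⟩
      | succ f' =>
        rw [pv_eqLcons]
        simp only
        set R1 := R.insert node ((R.getD node PySem.Set.empty).add v) with hR1
        have ht := hA g v R1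
        have hle : (dfsA g (f' + 1) v R1).2.2 ≤ f' := by
          rcases (pv_fuel (f' + 1)).1 g v R1 with h | h
          · omega
          · omega
        have htail := (IH (dfsA g (f' + 1) v R1).2.2 (by omega)).2 g node vs'
          ((dfsA g (f' + 1) v R1).2.1.insert node
            (PySem.Set.union ((dfsA g (f' + 1) v R1).2.1.getD node PySem.Set.empty)
              (dfsA g (f' + 1) v R1).1))
        constructor
        · intro k hk
          apply htail.1 k
          simp only [PySem.Dict.contains_insert]
          rw [ht.1 k (by simp only [hR1, PySem.Dict.contains_insert, hk]; simp)]
          simp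
        · intro h
          apply htail.2
          apply PySem.Dict.nodup_keys_insert
          apply ht.2
          exact PySem.Dict.nodup_keys_insert _ _ _ h

-- lazy/eager creation of a node's memo entry agree
lemma pv_LE (g : PySem.Dict Int (List Int)) (f : Nat) (v : Int) (vs : List Int)
    (R : PySem.Dict Int (PySem.Set Int)) (hv : R.contains v = false) (hnd : R.keys.Nodup) :
    dfsALoop g f v vs (R.insert v PySem.Set.empty)
      = ((dfsALoop g f v vs R).1.insert v ((dfsALoop g f v vs R).1.getD v PySem.Set.empty),
         (dfsALoop g f v vs R).2) := by
  cases vs with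
  | nil =>
    rw [pv_eqL0, pv_eqL0]
    rw [PySem.Dict.getD_of_not_contains R _ hv]
  | cons v' vs' =>
    cases f with
    | zero =>
      rw [pv_eqLz, pv_eqLz]
      rw [PySem.Dict.getD_of_not_contains R _ hv]
    | succ f' =>
      rw [pv_eqLcons, pv_eqLcons]
      simp only
      rw [PySem.Dict.getD_insert_self, pv_insert_insert,
          PySem.Dict.getD_of_not_contains R _ hv]
      set S := R.insert v ((PySem.Set.empty : PySem.Set Int).add v') with hS
      set t := dfsA g (f' + 1) v' S with ht
      set R3 := t.2.1.insert v (PySem.Set.union (t.2.1.getD v PySem.Set.empty) t.1) with hR3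
      have hndS : S.keys.Nodup := PySem.Dict.nodup_keys_insert _ _ _ hnd
      have hnd3 : R3.keys.Nodup :=
        PySem.Dict.nodup_keys_insert _ _ _ (((pv_inv (f' + 1)).1 g v' S).2 hndS)
      have hc3 : R3.contains v = true := PySem.Dict.contains_insert_self _ _ _
      have hcY : (dfsALoop g t.2.2 v vs' R3).1.contains v = true :=
        ((pv_inv t.2.2).2 g v vs' R3).1 v hc3
      have hndY : (dfsALoop g t.2.2 v vs' R3).1.keys.Nodup :=
        ((pv_inv t.2.2).2 g v vs' R3).2 hnd3
      rw [pv_insert_getD_self _ _ _ hcY hndY]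

-- potential function for fuel sufficiency
def pvPhi (g : PySem.Dict Int (List Int)) (R : PySem.Dict Int (PySem.Set Int)) : Nat :=
  ((g.keys.filter (fun k => !R.contains k)).map (fun k => (g.getD k []).length)).sum

def pvPhiX (g : PySem.Dict Int (List Int)) (node : Int) (R : PySem.Dict Int (PySem.Set Int)) : Nat :=
  ((g.keys.filter (fun k => (!R.contains k) && (!(k == node)))).map (fun k => (g.getD k []).length)).sum

lemma pv_sum_split (ks : List Int) (c : Int → Bool) (w : Int → Nat) (node : Int) (hg : ks.Nodup) :
    ((ks.filter (fun k => !c k)).map w).sum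
      = ((ks.filter (fun k => (!c k) && (!(k == node)))).map w).sum
        + (if c node then 0 else if node ∈ ks then w node else 0) := by
  induction ks with
  | nil => simp
  | cons x ks ih =>
    have hnd' : ks.Nodup := (List.nodup_cons.mp hg).2
    have hx : x ∉ ks := (List.nodup_cons.mp hg).1
    by_cases hxn : x = node
    · subst hxn
      cases hc : c x with
      | true => simp [hc, ih hnd']
      | false =>
        simp [hc, ih hnd', hx]
        omega
    · have hbeq : (x == node) = false := by simpa using hxn
      cases hc : c x with
      | true =>
        simp [hc, hbeq, ih hnd']
        have : ¬ node = x := fun hh => hxn hh.symm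
        by_cases hcn : c node = true <;> simp [hcn, this]
      | false =>
        simp [hc, hbeq, ih hnd']
        have : ¬ node = x := fun hh => hxn hh.symm
        by_cases hm : node ∈ ks <;> by_cases hcn : c node = true <;> simp [hm, hcn, this] <;> omega

lemma pv_phi_split (g : PySem.Dict Int (List Int)) (node : Int)
    (R : PySem.Dict Int (PySem.Set Int)) (hg : g.keys.Nodup) :
    pvPhi g R = pvPhiX g node R
      + (if R.contains node then 0 else (if node ∈ g.keys then (g.getD node []).length else 0)) := by
  unfold pvPhi pvPhiX
  exact pv_sum_split g.keys (fun k => R.contains k) (fun k => (g.getD k []).length) node hg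

lemma pv_phiX_insert (g : PySem.Dict Int (List Int)) (node : Int)
    (R : PySem.Dict Int (PySem.Set Int)) (s : PySem.Set Int) :
    pvPhiX g node (R.insert node s) = pvPhiX g node R := by
  unfold pvPhiX
  congr 1
  apply congrArg
  apply List.filter_congr
  intro k _
  by_cases hk : k = node
  · simp [hk]
  · have : (k == node) = false := by simpa using hk
    simp [PySem.Dict.contains_insert, this]

lemma pv_phi_of_contains (g : PySem.Dict Int (List Int)) (node : Int)
    (R : PySem.Dict Int (PySem.Set Int)) (hg : g.keys.Nodup) (hc : R.contains node = true) :
    pvPhi g R = pvPhiX g node R := by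
  rw [pv_phi_split g node R hg, hc]
  simp

-- fuel consumption is bounded by the potential
lemma pv_suff : ∀ f : Nat,
    (∀ (g : PySem.Dict Int (List Int)) node R, g.keys.Nodup →
      pvPhi g (dfsA g f node R).2.1 + f ≤ (dfsA g f node R).2.2 + 1 + pvPhi g R) ∧
    (∀ (g : PySem.Dict Int (List Int)) node vs R, g.keys.Nodup →
      pvPhiX g node (dfsALoop g f node vs R).1 + f
        ≤ (dfsALoop g f node vs R).2 + vs.length + pvPhiX g node R) := by
  intro f
  induction f using Nat.strong_induction_on with
  | _ f IH =>
    have hA : ∀ (g : PySem.Dict Int (List Int)) node R, g.keys.Nodup →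
        pvPhi g (dfsA g f node R).2.1 + f ≤ (dfsA g f node R).2.2 + 1 + pvPhi g R := by
      intro g node R hg
      cases f with
      | zero => rw [pv_eqA0]; dsimp only; omega
      | succ f' =>
        cases hget : R.get? node with
        | some s => rw [pv_eqAhit g f' node R s hget]; dsimp only; omega
        | none =>
          rw [pv_eqAmiss g f' node R hget]
          simp only
          have hcf : R.contains node = false := (PySem.Dict.get?_eq_none_iff_contains R node).mp hget
          have hloop := (IH f' (by omega)).2 g node (g.getD node []) R hg
          set q := dfsALoop g f' node (g.getD node []) R with hq
          -- Φ of the final dict equals Φx of q.1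
          have h1 : pvPhi g (q.1.insert node (q.1.getD node PySem.Set.empty)) = pvPhiX g node q.1 := by
            rw [pv_phi_of_contains g node _ hg (PySem.Dict.contains_insert_self _ _ _),
                pv_phiX_insert]
          -- Φ R = Φx R + weight of node
          have h2 : pvPhi g R = pvPhiX g node R
              + (if node ∈ g.keys then (g.getD node []).length else 0) := by
            rw [pv_phi_split g node R hg, hcf]
            simp
          have h3 : (g.getD node []).length ≤ (if node ∈ g.keys then (g.getD node []).length else 0) := by
            by_cases hm : node ∈ g.keys
            · simp [hm]
            · have : g.contains node = false := by
                rw [← Bool.not_eq_true]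
                rw [PySem.Dict.contains_iff_mem_keys]
                simpa using hm
              rw [PySem.Dict.getD_of_not_contains g _ this]
              simp
          rw [h1, h2]
          omega
    refine ⟨hA, ?_⟩
    intro g node vs R hg
    cases vs with
    | nil => rw [pv_eqL0]; dsimp only; omega
    | cons v vs' =>
      cases f with
      | zero => rw [pv_eqLz]; dsimp only; omega
      | succ f' =>
        rw [pv_eqLcons]
        simp only
        set R1 := R.insert node ((R.getD node PySem.Set.empty).add v) with hR1
        set t := dfsA g (f' + 1) v R1 with ht
        set R3 := t.2.1.insert node (PySem.Set.union (t.2.1.getD node PySem.Set.empty) t.1) with hR3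
        have hcall := hA g v R1 hg
        rw [← ht] at hcall
        have hle : t.2.2 ≤ f' := by
          rcases (pv_fuel (f' + 1)).1 g v R1 with h | h
          · rw [← ht] at h; omega
          · omega
        have htail := (IH t.2.2 (by omega)).2 g node vs' R3 hg
        -- Φx relations
        have e1 : pvPhiX g node R1 = pvPhiX g node R := pv_phiX_insert g node R _
      -- t.2.1 contains node
        have hc2 : t.2.1.contains node = true := by
          rw [ht]
          exact ((pv_inv (f' + 1)).1 g v R1).1 node (PySem.Dict.contains_insert_self _ _ _)
        have e3 : pvPhiX g node t.2.1 = pvPhi g t.2.1 :=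
          (pv_phi_of_contains g node t.2.1 hg hc2).symm
        have e4 : pvPhiX g node R3 = pvPhiX g node t.2.1 := pv_phiX_insert g node t.2.1 _
        have e5 : pvPhi g R1 = pvPhiX g node R1 :=
          pv_phi_of_contains g node R1 hg (PySem.Dict.contains_insert_self _ _ _)
        simp only [List.length_cons]
        omega

def pvPop (rest : List (Int × List Int)) (node : Int)
    (R : PySem.Dict Int (PySem.Set Int)) : PySem.Dict Int (PySem.Set Int) :=
  match rest with
  | [] => R
  | (p, _) :: _ => R.insert p (PySem.Set.union (R.getD p PySem.Set.empty) (R.getD node PySem.Set.empty))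

lemma pv_eqB_nil (g : PySem.Dict Int (List Int)) (R : PySem.Dict Int (PySem.Set Int)) :
    runB g [] R = R := by rw [runB]

lemma pv_eqB_pop (g : PySem.Dict Int (List Int)) (node : Int) (rest : List (Int × List Int))
    (R : PySem.Dict Int (PySem.Set Int)) :
    runB g ((node, []) :: rest) R = runB g rest (pvPop rest node R) := by
  cases rest with
  | nil => simp [runB, pvPop]
  | cons hd tl =>
    match hd with
    | (p, ps) => rw [runB, pvPop]

lemma pv_eqB_hit (g : PySem.Dict Int (List Int)) (node v : Int) (vs : List Int)
    (rest : List (Int × List Int)) (R : PySem.Dict Int (PySem.Set Int)) (sv : PySem.Set Int)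
    (h : (R.insert node ((R.getD node PySem.Set.empty).add v)).get? v = some sv) :
    runB g ((node, v :: vs) :: rest) R =
      runB g ((node, vs) :: rest)
        ((R.insert node ((R.getD node PySem.Set.empty).add v)).insert node
          (PySem.Set.union ((R.insert node ((R.getD node PySem.Set.empty).add v)).getD node PySem.Set.empty) sv)) := by
  rw [runB]
  split
  · next sv' h2 => rw [h] at h2; cases h2; rfl
  · next h2 => rw [h] at h2; cases h2

lemma pv_eqB_miss (g : PySem.Dict Int (List Int)) (node v : Int) (vs : List Int)
    (rest : List (Int × List Int)) (R : PySem.Dict Int (PySem.Set Int))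
    (h : (R.insert node ((R.getD node PySem.Set.empty).add v)).get? v = none) :
    runB g ((node, v :: vs) :: rest) R =
      runB g ((v, g.getD v []) :: (node, vs) :: rest)
        ((R.insert node ((R.getD node PySem.Set.empty).add v)).insert v PySem.Set.empty) := by
  rw [runB]
  split
  · next sv' h2 => rw [h] at h2; cases h2
  · next h2 => rfl

-- the stack machine simulates the recursive memoised DFS
lemma pv_main : ∀ f : Nat, ∀ (g : PySem.Dict Int (List Int)) (node : Int) (vs : List Int)
    (rest : List (Int × List Int)) (R : PySem.Dict Int (PySem.Set Int)),
    0 < (dfsALoop g f node vs R).2 → R.keys.Nodup →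
    runB g ((node, vs) :: rest) R = runB g rest (pvPop rest node (dfsALoop g f node vs R).1) := by
  intro f
  induction f using Nat.strong_induction_on with
  | _ f IH =>
    intro g node vs rest R hpos hnd
    cases vs with
    | nil => rw [pv_eqL0] at hpos ⊢; rw [pv_eqB_pop]
    | cons v vs' =>
      cases f with
      | zero => rw [pv_eqLz] at hpos; omega
      | succ f' =>
        rw [pv_eqLcons] at hpos ⊢
        simp only at hpos ⊢
        set R1 := R.insert node ((R.getD node PySem.Set.empty).add v) with hR1
        have hnd1 : R1.keys.Nodup := PySem.Dict.nodup_keys_insert _ _ _ hnd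
        cases hget : R1.get? v with
        | some sv =>
          rw [pv_eqAhit g f' v R1 sv hget] at hpos ⊢
          rw [pv_eqB_hit g node v vs' rest R sv hget]
          dsimp only at hpos ⊢
          exact IH f' (by omega) g node vs' rest _ hpos
            (PySem.Dict.nodup_keys_insert _ _ _ hnd1)
        | none =>
          rw [pv_eqAmiss g f' v R1 hget] at hpos ⊢
          rw [pv_eqB_miss g node v vs' rest R hget]
          dsimp only at hpos ⊢
          set q := dfsALoop g f' v (g.getD v []) R1 with hq
          have hvR1 : R1.contains v = false := (PySem.Dict.get?_eq_none_iff_contains R1 v).mp hget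
          have hqnd : q.1.keys.Nodup := ((pv_inv f').2 g v (g.getD v []) R1).2 hnd1
          have hqpos : 0 < q.2 :=
            lt_of_lt_of_le hpos (pv_loop_le g q.2 node vs' _)
          have hle : dfsALoop g f' v (g.getD v []) (R1.insert v PySem.Set.empty)
              = (q.1.insert v (q.1.getD v PySem.Set.empty), q.2) := by
            rw [pv_LE g f' v (g.getD v []) R1 hvR1 hnd1, ← hq]
          have hstep1 := IH f' (by omega) g v (g.getD v []) ((node, vs') :: rest)
            (R1.insert v PySem.Set.empty) (by rw [hle]; exact hqpos)
            (PySem.Dict.nodup_keys_insert _ _ _ hnd1)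
          rw [hle] at hstep1
          rw [hstep1]
          dsimp only [pvPop]
          rw [PySem.Dict.getD_insert_self]
          have hnd3 : ((q.1.insert v (q.1.getD v PySem.Set.empty)).insert node
              (PySem.Set.union ((q.1.insert v (q.1.getD v PySem.Set.empty)).getD node PySem.Set.empty)
                (q.1.getD v PySem.Set.empty))).keys.Nodup :=
            PySem.Dict.nodup_keys_insert _ _ _ (PySem.Dict.nodup_keys_insert _ _ _ hqnd)
          have hq2le : q.2 ≤ f' := by
            have h5 := pv_loop_le g f' v (g.getD v []) R1
            rw [← hq] at h5
            exact h5
          exact IH q.2 (by omega) g node vs' rest _ hpos hnd3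

lemma pv_step (g : PySem.Dict Int (List Int)) (i : Int) (R : PySem.Dict Int (PySem.Set Int))
    (f : Nat) (hnd : R.keys.Nodup) (hpos : 0 < (dfsA g f i R).2.2) :
    (dfsA g f i R).2.1
      = if R.contains i then R
        else runB g [(i, g.getD i [])] (R.insert i PySem.Set.empty) := by
  cases f with
  | zero => rw [pv_eqA0] at hpos; simp at hpos
  | succ f' =>
    cases hget : R.get? i with
    | some s =>
      have hc : R.contains i = true := by
        rw [PySem.Dict.contains_eq_isSome_get?, hget]
        rfl
      rw [pv_eqAhit g f' i R s hget, hc, if_pos rfl]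
    | none =>
      have hc : R.contains i = false := (PySem.Dict.get?_eq_none_iff_contains R i).mp hget
      rw [pv_eqAmiss g f' i R hget] at hpos ⊢
      dsimp only at hpos ⊢
      rw [hc]
      simp only [Bool.false_eq_true, if_false]
      set q := dfsALoop g f' i (g.getD i []) R with hq
      have hle : dfsALoop g f' i (g.getD i []) (R.insert i PySem.Set.empty)
          = (q.1.insert i (q.1.getD i PySem.Set.empty), q.2) := by
        rw [pv_LE g f' i (g.getD i []) R hc hnd, ← hq]
      have hmain := pv_main f' g i (g.getD i []) [] (R.insert i PySem.Set.empty)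
        (by rw [hle]; exact hpos) (PySem.Dict.nodup_keys_insert _ _ _ hnd)
      rw [hmain, hle, pv_eqB_nil]
      rfl

lemma pv_fold : ∀ (is : List Int) (g : PySem.Dict Int (List Int))
    (R : PySem.Dict Int (PySem.Set Int)) (f : Nat),
    g.keys.Nodup → R.keys.Nodup → is.length + pvPhi g R + 1 ≤ f →
    (is.foldl (fun (st : PySem.Dict Int (PySem.Set Int) × Nat) i =>
        let t := dfsA g st.2 i st.1; (t.2.1, t.2.2)) (R, f)).1
      = is.foldl (fun R i => if R.contains i then R
          else runB g [(i, g.getD i [])] (R.insert i PySem.Set.empty)) R := by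
  intro is
  induction is with
  | nil => intro g R f _ _ _; rfl
  | cons i is' ih =>
    intro g R f hg hnd hfuel
    simp only [List.foldl_cons, List.length_cons] at hfuel ⊢
    have hsuff := (pv_suff f).1 g i R hg
    have hpos : 0 < (dfsA g f i R).2.2 := by omega
    have hinv : is'.length + pvPhi g (dfsA g f i R).2.1 + 1 ≤ (dfsA g f i R).2.2 := by omega
    have hnd' : (dfsA g f i R).2.1.keys.Nodup := ((pv_inv f).1 g i R).2 hnd
    rw [← pv_step g i R f hnd hpos]
    exact ih g (dfsA g f i R).2.1 (dfsA g f i R).2.2 hg hnd' hinv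

lemma pv_len_range (m : Int) : (PySem.List.pyRange 0 m 1).length = m.toNat := by
  simp [PySem.List.pyRange]
  omega

lemma pv_phi_empty (g : PySem.Dict Int (List Int)) :
    pvPhi g PySem.Dict.empty = (g.keys.map (fun k => (g.getD k []).length)).sum := by
  unfold pvPhi
  congr 1
  apply congrArg
  have : ∀ k ∈ g.keys, (!(PySem.Dict.empty : PySem.Dict Int (PySem.Set Int)).contains k) = true := by
    intro k _
    rw [PySem.Dict.contains_empty]
    rfl
  rw [List.filter_congr this, List.filter_true]

lemma pv_graph_nodup (prerequisites : List (List Int)) : (pvGraph prerequisites).keys.Nodup := by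
  unfold pvGraph
  exact PySem.Dict.nodup_keys_foldl_modify_key prerequisites pvPairFst []
    (fun _ row old => old ++ [pvPairSnd row]) PySem.Dict.empty
    (by rw [PySem.Dict.keys_empty]; exact List.nodup_nil)

theorem pv_ports_eq (n numCourses : Int) (prerequisites queries : List (List Int)) :
    correctSolution n numCourses prerequisites queries
      = correctSolution_alt n numCourses prerequisites queries := by
  unfold correctSolution correctSolution_alt
  dsimp only
  have hg := pv_graph_nodup prerequisites
  have hnd0 : (PySem.Dict.empty : PySem.Dict Int (PySem.Set Int)).keys.Nodup := by
    rw [PySem.Dict.keys_empty]; exact List.nodup_nil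
  have hfuel : (PySem.List.pyRange 0 numCourses 1).length
      + pvPhi (pvGraph prerequisites) PySem.Dict.empty + 1
      ≤ numCourses.toNat
        + ((pvGraph prerequisites).keys.map
            (fun k => ((pvGraph prerequisites).getD k []).length)).sum + 1 := by
    rw [pv_len_range, pv_phi_empty]
  have h := pv_fold (PySem.List.pyRange 0 numCourses 1) (pvGraph prerequisites)
    PySem.Dict.empty
    (numCourses.toNat + (((pvGraph prerequisites).keys.map
      (fun k => ((pvGraph prerequisites).getD k []).length)).sum) + 1) hg hnd0 hfuel
  rw [h]


-- ===== VERDICT (by name: the statement is the Claim_ definition above) =====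
theorem correctSolution_spec : Claim_equal_correctSolution := by
  intro n numCourses prerequisites queries _hdom _hpre
  unfold Spec_correctSolution
  exact pv_ports_eq n numCourses prerequisites queries
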